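-- pv_equiv track=rewrite | github.com/MrBrantCode/unitest_baseline | mut_generate/mist_train_cf/cf_16310/solution.py | classify_input
-- ===== SOURCE A (Python) =====
-- import math
--
-- def classify_input(num):
--     # Helper function to check if the input is a prime number
--     def is_prime(num):
--         # 0 and 1 are not prime numbers
--         if num < 2:
--             return False
--
--         # Check for divisibility from 2 to the square root of the number
--         for i in range(2, int(math.sqrt(abs(num))) + 1):
--             if abs(num) % i == 0:
--                 return False
--
--         return True
--
--     # Helper function to check if the input is a Fibonacci number
--     def is_fibonacci(num):
--         # Check if the number is a perfect square of a Fibonacci number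
--         return is_perfect_square(5 * num**2 + 4) or is_perfect_square(5 * num**2 - 4)
--
--     # Helper function to check if the input is a perfect square
--     def is_perfect_square(num):
--         # Check if the square root of the number is an integer
--         return math.isqrt(abs(num))**2 == abs(num)
--
--     # Helper function to check if the input is a palindrome
--     def is_palindrome(num):
--         # Convert the number to a string and check if it is equal to its reverse
--         return str(num) == str(num)[::-1]
--
--     # Check if the input is zero
--     if num == 0:
--         return "zero"
--
--     # Check if the input is a prime number
--     if is_prime(num):
--         # Check if the input is a Fibonacci number
--         if is_fibonacci(num):
--             return "prime Fibonacci"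
--
--         # Check if the input is a palindrome
--         if is_palindrome(num):
--             if num < 0:
--                 return "negative prime palindrome"
--             else:
--                 return "prime palindrome"
--
--     # Check if the input is a perfect square and a palindrome
--     if is_perfect_square(num) and is_palindrome(num):
--         return "square palindrome"
--
--     # If none of the above conditions are met, return None
--     return None
-- ===== SOURCE B (Python) =====
-- import math
--
-- def _is_prime(n):
--     if n < 2:
--         return False
--     if n % 2 == 0:
--         return n == 2
--     d = 3
--     while d * d <= n:
--         if n % d == 0:
--             return False
--         d += 2
--     return True
--
-- def _is_fib(n):
--     # iterative Fibonacci generator: walk the sequence until it reaches or passes n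
--     a, b = 0, 1
--     while a < n:
--         a, b = b, a + b
--     return a == n
--
-- def classify_input(num):
--     if num == 0:
--         return "zero"
--     s = str(num)
--     pal = (s == s[::-1])
--     if _is_prime(num):
--         if _is_fib(num):
--             return "prime Fibonacci"
--         if pal:
--             return "prime palindrome"
--     if math.isqrt(abs(num)) ** 2 == abs(num) and pal:
--         return "square palindrome"
--     return None
-- ===== Notes on version B (the rewrite author's own statement) =====
-- stated objective: alternative
-- what changed: The closed-form Fibonacci test (perfect square of 5n^2+-4) is replaced by an iterative Fibonacci-pair generator that walks the sequence and compares each value to n; the prime test's range(2, float-sqrt+1) full trial division becomes an odd-only while loop with a multiplicative bound (d*d <= n, no sqrt); the palindrome string test is computed once and the unreachable negative-prime-palindrome branch is dropped.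
import Mathlib
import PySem

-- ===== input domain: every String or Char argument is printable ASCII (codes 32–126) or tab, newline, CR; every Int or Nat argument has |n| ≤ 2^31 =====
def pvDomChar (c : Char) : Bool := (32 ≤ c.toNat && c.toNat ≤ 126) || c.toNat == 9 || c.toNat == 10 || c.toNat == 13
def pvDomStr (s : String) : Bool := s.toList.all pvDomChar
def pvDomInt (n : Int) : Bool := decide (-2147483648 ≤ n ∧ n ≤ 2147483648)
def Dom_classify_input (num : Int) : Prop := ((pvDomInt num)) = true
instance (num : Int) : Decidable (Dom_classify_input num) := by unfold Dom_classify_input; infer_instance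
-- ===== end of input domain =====

-- B replaces A's closed-form Fibonacci test (perfect square of 5n²±4) by an iterative
-- Fibonacci-pair generator, A's range(2, √n+1) trial division by an odd-only loop with a
-- multiplicative bound (d*d <= n), and computes the palindrome string test once (objective: alternative).

-- ===== PORT A =====
-- is_perfect_square: math.isqrt(abs(num))**2 == abs(num); math.isqrt ported as Nat.sqrt (exact)
def pvA_isPerfSq (n : Int) : Bool := Nat.sqrt n.natAbs ^ 2 == n.natAbs

-- is_prime; int(math.sqrt(abs(num))) ported as Nat.sqrt num.natAbs — float sqrt is exact here
-- for |num| ≤ 2^31 (checked against CPython); loop with early `return False` = List.all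
def pvA_isPrime (num : Int) : Bool :=
  if num < 2 then false
  else (PySem.List.pyRange 2 ((Nat.sqrt num.natAbs : Int) + 1) 1).all
        (fun i => !(PySem.Int.mod (num.natAbs : Int) i == 0))

def pvA_isFib (num : Int) : Bool :=
  pvA_isPerfSq (5 * num ^ 2 + 4) || pvA_isPerfSq (5 * num ^ 2 - 4)

-- str(num) == str(num)[::-1]; s[::-1] is reverse (PySem.Str.slice?_none_none_neg_one)
def pvA_isPal (num : Int) : Bool :=
  PySem.Int.toChars num == (PySem.Int.toChars num).reverse

def classify_input (num : Int) : Option String :=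
  if num == 0 then some "zero"
  else if pvA_isPrime num then
    if pvA_isFib num then some "prime Fibonacci"
    else if pvA_isPal num then
      if num < 0 then some "negative prime palindrome" else some "prime palindrome"
    else if pvA_isPerfSq num && pvA_isPal num then some "square palindrome"
    else none
  else if pvA_isPerfSq num && pvA_isPal num then some "square palindrome"
  else none

-- ===== PORT B =====
-- while d * d <= n: if n % d == 0: return False; d += 2
def pvB_oddLoop (n : Int) (d : Int) : Bool :=
  if _h : d * d ≤ n then
    if PySem.Int.mod n d == 0 then false
    else pvB_oddLoop n (d + 2)
  else true
termination_by (n + 2 - d).toNat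
decreasing_by
  have hd : d ≤ n := by nlinarith [sq_nonneg d, sq_nonneg (d-1)]
  omega

def pvB_isPrime (n : Int) : Bool :=
  if n < 2 then false
  else if PySem.Int.mod n 2 == 0 then n == 2
  else pvB_oddLoop n 3

-- while a < n: a, b = b, a + b  — then return a == n.  The `0 < b` guard only makes the
-- recursion total; every reachable state (from a,b = 0,1) has 0 < b.
def pvB_fibLoop (a b n : Int) : Bool :=
  if a < n then
    if _h : 0 < b then pvB_fibLoop b (a + b) n else false
  else a == n
termination_by (2 * n - a - b).toNat + (if a < n then 1 else 0)
decreasing_by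
  rename_i hlt
  by_cases hb : b < n
  · have h1 : 0 < 2 * n - a - b := by omega
    simp only [if_pos hlt, if_pos hb]
    omega
  · simp only [if_pos hlt, if_neg hb]
    omega

def pvB_isFibGen (n : Int) : Bool := pvB_fibLoop 0 1 n

def classify_input_alt (num : Int) : Option String :=
  if num == 0 then some "zero"
  else
    let s := PySem.Int.toChars num
    let pal := s == s.reverse
    if pvB_isPrime num then
      if pvB_isFibGen num then some "prime Fibonacci"
      else if pal then some "prime palindrome"
      else if (Nat.sqrt num.natAbs ^ 2 == num.natAbs) && pal then some "square palindrome"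
      else none
    else if (Nat.sqrt num.natAbs ^ 2 == num.natAbs) && pal then some "square palindrome"
    else none

-- ===== PRECONDITION & SPEC =====
def Spec_classify_input (num : Int) (out : Option String) : Prop := out = classify_input_alt num
instance (num : Int) (out : Option String) : Decidable (Spec_classify_input num out) := by unfold Spec_classify_input; infer_instance

-- ===== CLAIM (what is proved, stated in full; the proofs are below) =====
def Claim_equal_classify_input : Prop := ∀ (num : Int), Dom_classify_input num → Spec_classify_input num (classify_input num)

-- ===== LEMMAS AND PROOFS =====

-- from `a = true ↔ b = true` to `a = b`
theorem bool_eq_of_iff {a b : Bool} (h : (a = true) ↔ (b = true)) : a = b := by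
  cases a <;> cases b <;> simp_all

-- ===== prime-test equivalence =====

-- B's while-loop accepts iff no divisor among d, d+2, d+4, … with square ≤ n divides n
theorem pvB_oddLoop_spec (n d : Int) (hd : 0 < d) :
    pvB_oddLoop n d = true ↔ ∀ e : Int, d ≤ e → e * e ≤ n → 2 ∣ e - d → ¬ e ∣ n := by
  induction d using pvB_oddLoop.induct n with
  | case1 d h hmod =>
    rw [pvB_oddLoop]
    simp only [dif_pos h, if_pos hmod, Bool.false_eq_true, false_iff]
    intro hall
    exact hall d le_rfl h (by omega) ((PySem.Int.mod_eq_zero_iff_dvd n d).mp (by simpa using hmod))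
  | case2 d h hmod ih =>
    rw [pvB_oddLoop]
    simp only [dif_pos h, if_neg hmod]
    rw [ih (by omega)]
    have hndvd : ¬ d ∣ n := fun hdvd => hmod (by simp [(PySem.Int.mod_eq_zero_iff_dvd n d).mpr hdvd])
    constructor
    · intro hall e he hee hpar hdvd
      by_cases hed : e = d
      · exact hndvd (hed ▸ hdvd)
      · exact hall e (by omega) hee (by omega) hdvd
    · intro hall e he hee hpar
      exact hall e (by omega) hee (by omega)
  | case3 d h =>
    rw [pvB_oddLoop]
    simp only [dif_neg h, true_iff]
    intro e he hee _ _
    have : d * d ≤ e * e := by nlinarith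
    omega

-- A's range(2, isqrt(n)+1) trial division accepts iff no divisor with square ≤ n divides n
theorem pvA_isPrime_iff (n : Int) (h2 : 2 ≤ n) :
    pvA_isPrime n = true ↔ ∀ e : Int, 2 ≤ e → e * e ≤ n → ¬ e ∣ n := by
  unfold pvA_isPrime
  rw [if_neg (by omega), List.all_eq_true]
  have habs : (n.natAbs : Int) = n := by omega
  constructor
  · intro hall e he hee hdvd
    have hsq' : ((e.toNat : Int)) * (e.toNat : Int) ≤ ((n.natAbs : Int)) := by
      rw [show ((e.toNat : Int)) = e by omega, habs]; exact hee
    have hsq : e.toNat ≤ Nat.sqrt n.natAbs := Nat.le_sqrt.mpr (by exact_mod_cast hsq')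
    have hmem : e ∈ PySem.List.pyRange 2 ((Nat.sqrt n.natAbs : Int) + 1) 1 := by
      rw [PySem.List.mem_pyRange_one]
      exact ⟨he, by omega⟩
    have := hall e hmem
    rw [habs] at this
    simp only [Bool.not_eq_eq_eq_not, Bool.not_true, beq_eq_false_iff_ne] at this
    exact this ((PySem.Int.mod_eq_zero_iff_dvd n e).mpr hdvd)
  · intro hP i hi
    rw [PySem.List.mem_pyRange_one] at hi
    have hsq : i.toNat ≤ Nat.sqrt n.natAbs := by omega
    rw [Nat.le_sqrt] at hsq
    have hii : i * i ≤ n := by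
      have h1 : ((i.toNat : Int)) * (i.toNat : Int) ≤ (n.natAbs : Int) := by exact_mod_cast hsq
      rw [show ((i.toNat : Int)) = i by omega, habs] at h1
      exact h1
    have := hP i hi.1 hii
    rw [habs]
    simp only [Bool.not_eq_eq_eq_not, Bool.not_true, beq_eq_false_iff_ne]
    exact fun hm => this ((PySem.Int.mod_eq_zero_iff_dvd n i).mp hm)

theorem isPrime_eq (n : Int) : pvA_isPrime n = pvB_isPrime n := by
  by_cases hlt : n < 2
  · unfold pvA_isPrime pvB_isPrime
    rw [if_pos hlt, if_pos hlt]
  replace hlt : 2 ≤ n := by omega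
  have hA := pvA_isPrime_iff n hlt
  by_cases hev : (2:Int) ∣ n
  · have hB : pvB_isPrime n = (n == 2) := by
      unfold pvB_isPrime
      rw [if_neg (by omega), if_pos (by simp [hev])]
    rw [hB]
    by_cases hn2 : n = 2
    · subst hn2; unfold pvA_isPrime; norm_num
    · have hAf : pvA_isPrime n = false := by
        rw [← Bool.not_eq_true, hA]
        intro hall
        exact hall 2 le_rfl (by omega) hev
      rw [hAf]
      simp [hn2]
  · have hB : pvB_isPrime n = pvB_oddLoop n 3 := by
      unfold pvB_isPrime
      rw [if_neg (by omega),
        if_neg (by simp; omega)]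
    rw [hB]
    apply bool_eq_of_iff
    rw [hA, pvB_oddLoop_spec n 3 (by omega)]
    constructor
    · intro hall e he hee _
      exact hall e (by omega) hee
    · intro hall e he hee hdvd
      have : ¬ 2 ∣ e := fun h => hev (h.trans hdvd)
      exact hall e (by omega) hee (by omega) hdvd

theorem pvB_isPrime_two_le (n : Int) (h : pvB_isPrime n = true) : 2 ≤ n := by
  unfold pvB_isPrime at h
  by_contra hc
  simp [show n < 2 by omega] at h

-- ===== Fibonacci-test equivalence =====

-- Lucas numbers (companion sequence of fib)
def pvLucas : ℕ → ℕ
  | 0 => 2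
  | 1 => 1
  | k + 2 => pvLucas k + pvLucas (k + 1)

theorem pvLucas_eq (k : ℕ) :
    (pvLucas k : ℤ) = 2 * Nat.fib (k + 1) - Nat.fib k ∧
    (pvLucas (k + 1) : ℤ) = 2 * Nat.fib (k + 2) - Nat.fib (k + 1) := by
  induction k with
  | zero => decide
  | succ k ih =>
    refine ⟨ih.2, ?_⟩
    have h1 := ih.1
    have h2 := ih.2
    rw [show k + 1 + 2 = k + 2 + 1 by ring, pvLucas, Nat.fib_add_two (n := k + 1)]
    push_cast
    rw [Nat.fib_add_two (n := k)] at h2 ⊢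
    push_cast at h2 ⊢
    linarith

-- Cassini-style identity
theorem pvCassini (k : ℕ) :
    ((Nat.fib (k+1) : ℤ))^2 - Nat.fib (k+1) * Nat.fib k - (Nat.fib k : ℤ)^2 = (-1)^k := by
  induction k with
  | zero => decide
  | succ k ih =>
    rw [Nat.fib_add_two (n := k)]
    push_cast
    linear_combination (-1 : ℤ) * ih

-- L_k² − 5·F_k² = ±4
theorem pvLucas_pell (k : ℕ) :
    (pvLucas k : ℤ)^2 - 5 * (Nat.fib k : ℤ)^2 = 4 * (-1)^k := by
  have hL := (pvLucas_eq k).1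
  have hC := pvCassini k
  rw [hL]
  nlinarith [hC]

-- descent: every solution of m² − 5n² = ±4 is a (fib, lucas) pair
theorem pell_to_fib (n : ℕ) : ∀ m : ℤ, 0 ≤ m →
    (m^2 - 5 * (n:ℤ)^2 = 4 ∨ m^2 - 5 * (n:ℤ)^2 = -4) →
    ∃ k, (Nat.fib k : ℤ) = n ∧ (pvLucas k : ℤ) = m := by
  induction n using Nat.strong_induction_on with
  | _ n IH =>
    intro m hm hp
    match n, IH with
    | 0, _ =>
      refine ⟨0, by simp, ?_⟩
      have : m = 2 := by
        rcases hp with h | h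
        · push_cast at h
          have h2 : (m - 2) * (m + 2) = 0 := by linear_combination h
          rcases mul_eq_zero.mp h2 with h3 | h3 <;> omega
        · push_cast at h
          nlinarith [sq_nonneg m]
      simp [this, pvLucas]
    | 1, _ =>
      rcases hp with h | h
      · refine ⟨2, by simp, ?_⟩
        push_cast at h
        have h2 : (m - 3) * (m + 3) = 0 := by linear_combination h
        have : m = 3 := by rcases mul_eq_zero.mp h2 with h3 | h3 <;> omega
        simp [this, pvLucas]
      · refine ⟨1, by simp, ?_⟩
        push_cast at h
        have h2 : (m - 1) * (m + 1) = 0 := by linear_combination h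
        have : m = 1 := by rcases mul_eq_zero.mp h2 with h3 | h3 <;> omega
        simp [this, pvLucas]
    | (n0 + 2), IH =>
      set N : ℤ := ((n0 + 2 : ℕ) : ℤ) with hN
      have hN2 : 2 ≤ N := by simp [hN]
      -- bounds
      have hmN : N < m := by
        rcases hp with h | h <;> nlinarith
      have hm3 : m < 3 * N := by
        rcases hp with h | h <;> nlinarith
      -- parity: m ≡ N (mod 2)
      have hpar : (2:ℤ) ∣ m - N := by
        rcases Int.even_or_odd (m - N) with he | ho
        · exact he.two_dvd
        · exfalso
          obtain ⟨c, hc⟩ := ho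
          have key : (-4)*(N*N) + 4*(c*c) + 4*(N*c) + 2*N + 4*c + 1 = m^2 - 5*N^2 := by
            rw [show m = N + 2*c + 1 by omega]; ring
          have k2 : (-4)*(N*N) + 4*(c*c) + 4*(N*c) + 2*N + 4*c + 1 = 4 ∨
                    (-4)*(N*N) + 4*(c*c) + 4*(N*c) + 2*N + 4*c + 1 = -4 := by
            rcases hp with h | h
            · exact Or.inl (key.trans h)
            · exact Or.inr (key.trans h)
          generalize N*N = x at k2
          generalize c*c = y at k2
          generalize N*c = z at k2
          omega
      obtain ⟨c, hc⟩ := hpar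
      have hc1 : 1 ≤ c := by omega
      have hcN : c ≤ N - 1 := by omega
      -- descended solution (N - c, 3c - N)
      have hstep : (3*c - N)^2 - 5 * (N - c)^2 = m^2 - 5 * N^2 := by
        rw [show m = N + 2*c by omega]; ring
      have hm'pos : 0 ≤ 3*c - N := by
        rcases hp with h | h <;> nlinarith
      have hn'lt : ((N - c).toNat) < n0 + 2 := by omega
      have hn'cast : (((N - c).toNat : ℕ) : ℤ) = N - c := by omega
      obtain ⟨k, hfk, hlk⟩ := IH ((N - c).toNat) hn'lt (3*c - N) hm'pos (by
        rw [hn'cast, hstep]; exact hp)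
      rw [hn'cast] at hfk
      -- reconstruct: fib (k+1) = c, fib (k+2) = N, lucas (k+2) = m
      have hLk := (pvLucas_eq k).1
      have hfib1 : (Nat.fib (k+1) : ℤ) = c := by
        rw [hlk, hfk] at hLk; linarith
      have hfib2 : (Nat.fib (k+2) : ℤ) = N := by
        rw [Nat.fib_add_two (n := k)]; push_cast; rw [hfk, hfib1]; ring
      have hLk1 := (pvLucas_eq (k+1)).1
      refine ⟨k + 2, hfib2, ?_⟩
      have : (pvLucas (k+2) : ℤ) = pvLucas k + pvLucas (k+1) := by
        rw [pvLucas]; push_cast; ring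
      rw [this, hlk, hLk1, hfib2, hfib1]
      omega

-- perfect-square test via Nat.sqrt
theorem sqrt_test (x : ℕ) : (Nat.sqrt x ^ 2 = x) ↔ ∃ m : ℕ, m ^ 2 = x := by
  constructor
  · exact fun h => ⟨Nat.sqrt x, h⟩
  · rintro ⟨m, rfl⟩
    rw [pow_two, Nat.sqrt_eq', ← pow_two]

-- A's closed-form test, characterised (n ≥ 2)
theorem pvA_isFib_iff (n : Int) (h2 : 2 ≤ n) :
    pvA_isFib n = true ↔ ∃ k, (Nat.fib k : ℤ) = n := by
  have h5p : (0:ℤ) ≤ 5 * n ^ 2 + 4 := by nlinarith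
  have h5m : (0:ℤ) ≤ 5 * n ^ 2 - 4 := by nlinarith
  unfold pvA_isFib pvA_isPerfSq
  simp only [Bool.or_eq_true, beq_iff_eq, sqrt_test]
  constructor
  · rintro (⟨m, hm⟩ | ⟨m, hm⟩)
    · have hm' : (m:ℤ)^2 - 5 * n^2 = 4 := by
        have hc := congrArg (fun x : ℕ => (x : ℤ)) hm
        push_cast at hc
        rw [abs_of_nonneg h5p] at hc
        linarith
      obtain ⟨k, hk, -⟩ := pell_to_fib n.toNat (m:ℤ) (by positivity) (by
        rw [show ((n.toNat : ℕ) : ℤ) = n by omega]; exact Or.inl hm')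
      exact ⟨k, by omega⟩
    · have hm' : (m:ℤ)^2 - 5 * n^2 = -4 := by
        have hc := congrArg (fun x : ℕ => (x : ℤ)) hm
        push_cast at hc
        rw [abs_of_nonneg h5m] at hc
        linarith
      obtain ⟨k, hk, -⟩ := pell_to_fib n.toNat (m:ℤ) (by positivity) (by
        rw [show ((n.toNat : ℕ) : ℤ) = n by omega]; exact Or.inr hm')
      exact ⟨k, by omega⟩
  · rintro ⟨k, hk⟩
    have hpell := pvLucas_pell k
    rw [hk] at hpell
    rcases Nat.even_or_odd k with he | ho
    · left
      refine ⟨pvLucas k, ?_⟩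
      have : ((-1:ℤ))^k = 1 := he.neg_one_pow
      rw [this] at hpell
      have hv : ((pvLucas k : ℤ))^2 = 5 * n^2 + 4 := by linarith
      have : ((pvLucas k ^ 2 : ℕ) : ℤ) = (((5 * n ^ 2 + 4 : ℤ).natAbs : ℕ) : ℤ) := by
        push_cast
        rw [abs_of_nonneg h5p]
        linarith
      exact_mod_cast this
    · right
      refine ⟨pvLucas k, ?_⟩
      have : ((-1:ℤ))^k = -1 := ho.neg_one_pow
      rw [this] at hpell
      have hv : ((pvLucas k : ℤ))^2 = 5 * n^2 - 4 := by linarith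
      have : ((pvLucas k ^ 2 : ℕ) : ℤ) = (((5 * n ^ 2 - 4 : ℤ).natAbs : ℕ) : ℤ) := by
        push_cast
        rw [abs_of_nonneg h5m]
        linarith
      exact_mod_cast this

-- B's generator loop, characterised along the fib pairs (j ≥ 2, strict growth)
theorem pvB_fibLoop_spec (n : Int) : ∀ (K : ℕ) (j : ℕ), 2 ≤ j → (n - Nat.fib j).toNat = K →
    (pvB_fibLoop (Nat.fib j) (Nat.fib (j+1)) n = true ↔ ∃ i, j ≤ i ∧ (Nat.fib i : ℤ) = n) := by
  intro K
  induction K using Nat.strong_induction_on with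
  | _ K IH =>
    intro j hj hK
    rw [pvB_fibLoop]
    by_cases hlt : (Nat.fib j : ℤ) < n
    · have hbpos : (0:ℤ) < Nat.fib (j+1) := by
        exact_mod_cast Nat.fib_pos.mpr (by omega)
      rw [if_pos hlt, dif_pos hbpos]
      have hsum : (Nat.fib j : ℤ) + Nat.fib (j+1) = Nat.fib (j+2) := by
        rw [Nat.fib_add_two]; push_cast; ring
      rw [hsum]
      have hmono : Nat.fib j < Nat.fib (j+1) := Nat.fib_lt_fib_succ hj
      have hKlt : (n - Nat.fib (j+1)).toNat < K := by omega
      rw [IH _ hKlt (j+1) (by omega) rfl]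
      constructor
      · rintro ⟨i, hi, hfi⟩; exact ⟨i, by omega, hfi⟩
      · rintro ⟨i, hi, hfi⟩
        refine ⟨i, ?_, hfi⟩
        rcases Nat.lt_or_ge i (j+1) with h | h
        · exfalso; have : i = j := by omega
          rw [this] at hfi; omega
        · omega
    · rw [if_neg hlt]
      constructor
      · intro h
        exact ⟨j, le_rfl, by simpa using h⟩
      · rintro ⟨i, hi, hfi⟩
        have : Nat.fib j ≤ Nat.fib i := Nat.fib_mono hi
        have : (Nat.fib j : ℤ) = n := by omega
        simp [this]

theorem pvB_isFibGen_iff (n : Int) (h2 : 2 ≤ n) :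
    pvB_isFibGen n = true ↔ ∃ k, (Nat.fib k : ℤ) = n := by
  have step : pvB_isFibGen n = pvB_fibLoop (Nat.fib 2) (Nat.fib 3) n := by
    unfold pvB_isFibGen
    rw [pvB_fibLoop, if_pos (by omega), dif_pos (by omega),
        pvB_fibLoop, if_pos (by omega), dif_pos (by omega)]
    norm_num
  rw [step, pvB_fibLoop_spec n _ 2 le_rfl rfl]
  constructor
  · rintro ⟨i, -, hfi⟩; exact ⟨i, hfi⟩
  · rintro ⟨k, hk⟩
    refine ⟨k, ?_, hk⟩
    match k with
    | 0 => simp at hk; omega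
    | 1 => simp at hk; omega
    | (k+2) => omega

theorem isFib_eq (n : Int) (h2 : 2 ≤ n) : pvA_isFib n = pvB_isFibGen n := by
  apply bool_eq_of_iff
  rw [pvA_isFib_iff n h2, pvB_isFibGen_iff n h2]

-- ===== VERDICT (by name: the statement is the Claim_ definition above) =====
theorem classify_input_spec : Claim_equal_classify_input := by
  intro num _
  unfold Spec_classify_input classify_input classify_input_alt
  by_cases h0 : num = 0
  · simp [h0]
  rw [isPrime_eq]
  by_cases hp : pvB_isPrime num = true
  · have h2 := pvB_isPrime_two_le num hp
    rw [isFib_eq num h2]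
    simp only [hp, if_true, pvA_isPal, pvA_isPerfSq, beq_iff_eq]
    have : ¬ (num < 0) := by omega
    simp [h0, this]
  · simp only [Bool.not_eq_true] at hp
    simp [hp, h0, pvA_isPal, pvA_isPerfSq]
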